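-- pv_equiv track=rewrite | github.com/DaStMPE/PBMGA | SRC/Write_Abaqus_Output.py | add_newline_after_16th_comma
-- ===== SOURCE A (Python) =====
-- def add_newline_after_16th_comma(input_string):
--     chunk_size = 16
--     result = ""
--     comma_count = 0
--
--     for char in input_string:
--         result += char
--         if char == ',':
--             comma_count += 1
--             if comma_count % chunk_size == 0:
--                 result += '\n'
--
--     return result
-- ===== SOURCE B (Python) =====
-- def add_newline_after_16th_comma(input_string):
--     # Split on commas once, then rebuild: the i-th comma (1-based) gets a
--     # newline right after it whenever i % 16 == 0.
--     tokens = input_string.split(',')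
--     parts = [tokens[0]]
--     for i in range(1, len(tokens)):
--         parts.append(',')
--         if i % 16 == 0:
--             parts.append('\n')
--         parts.append(tokens[i])
--     return ''.join(parts)
-- ===== Notes on version B (the rewrite author's own statement) =====
-- stated objective: faster
-- what changed: Replaces the per-character scan with a running comma counter and repeated string concatenation by splitting the string on commas once and rejoining the fields with an indexed loop.
import Mathlib
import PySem

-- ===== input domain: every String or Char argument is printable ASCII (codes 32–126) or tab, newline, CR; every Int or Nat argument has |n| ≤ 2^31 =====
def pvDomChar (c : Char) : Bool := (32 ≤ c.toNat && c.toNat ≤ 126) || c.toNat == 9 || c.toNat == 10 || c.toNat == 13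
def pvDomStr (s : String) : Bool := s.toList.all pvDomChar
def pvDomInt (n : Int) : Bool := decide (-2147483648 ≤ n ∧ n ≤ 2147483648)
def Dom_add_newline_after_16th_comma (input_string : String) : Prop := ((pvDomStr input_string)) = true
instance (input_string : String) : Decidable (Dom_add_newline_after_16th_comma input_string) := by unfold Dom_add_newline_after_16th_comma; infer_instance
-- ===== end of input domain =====

-- B replaces A's per-character scan with a comma counter by split-on-comma + indexed rejoin; equal return values proved on Dom.


-- ===== PORT A =====
-- the for-loop over the characters, with its accumulated result and comma counter;
-- Lean's Int % agrees with Python's % here (the divisor 16 is positive and the counter nonnegative)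
def pvA_go : List Char → List Char → Int → List Char
  | [], result, _ => result
  | ch :: rest, result, comma_count =>
    let result' := result ++ [ch]
    if ch = ',' then
      let cc := comma_count + 1
      if cc % 16 = 0 then pvA_go rest (result' ++ ['\n']) cc
      else pvA_go rest result' cc
    else pvA_go rest result' comma_count

def add_newline_after_16th_comma (input_string : String) : String :=
  String.ofList (pvA_go input_string.toList [] 0)

-- ===== PORT B =====
-- Source B's rebuild loop over tokens[1:]: per field a comma, a newline when the comma index i is divisible by 16, then the field
def pvB_join : List (List Char) → Nat → List Char
  | [], _ => []
  | t :: rest, i => ',' :: ((if i % 16 = 0 then ['\n'] else []) ++ t ++ pvB_join rest (i + 1))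

-- input_string.split(',') is ported as List.splitOn ',' on the character list
def add_newline_after_16th_comma_alt (input_string : String) : String :=
  match input_string.toList.splitOn ',' with
  | [] => ""  -- unreachable: splitOn never returns []
  | t0 :: rest => String.ofList (t0 ++ pvB_join rest 1)

-- ===== PRECONDITION & SPEC =====
def Spec_add_newline_after_16th_comma (input_string : String) (out : String) : Prop := out = add_newline_after_16th_comma_alt input_string
instance (input_string : String) (out : String) : Decidable (Spec_add_newline_after_16th_comma input_string out) := by unfold Spec_add_newline_after_16th_comma; infer_instance

-- ===== CLAIM (what is proved, stated in full; the proofs are below) =====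
def Claim_equal_add_newline_after_16th_comma : Prop := ∀ (input_string : String), Dom_add_newline_after_16th_comma input_string → Spec_add_newline_after_16th_comma input_string (add_newline_after_16th_comma input_string)

-- ===== LEMMAS AND PROOFS =====

-- the stream of emitted characters, independent of the accumulator
def pvF : List Char → Int → List Char
  | [], _ => []
  | ch :: rest, c =>
    if ch = ',' then ch :: ((if (c + 1) % 16 = 0 then ['\n'] else []) ++ pvF rest (c + 1))
    else ch :: pvF rest c

theorem pvA_go_eq (cs : List Char) : ∀ (acc : List Char) (c : Int),
    pvA_go cs acc c = acc ++ pvF cs c := by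
  induction cs with
  | nil => intro acc c; simp [pvA_go, pvF]
  | cons ch rest ih =>
    intro acc c
    by_cases h : ch = ','
    · by_cases h16 : (c + 1) % 16 = 0 <;>
        simp [pvA_go, pvF, h, h16, ih, List.append_assoc]
    · simp [pvA_go, pvF, h, ih, List.append_assoc]

theorem pvF_splitOn (cs : List Char) : ∀ (n : Nat),
    pvF cs (n : Int) =
      (cs.splitOn ',').headI ++ pvB_join (cs.splitOn ',').tail (n + 1) := by
  induction cs with
  | nil => intro n; simp [pvF, List.splitOn, List.splitOnP_nil, pvB_join]
  | cons ch rest ih =>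
    intro n
    by_cases h : ch = ','
    · subst h
      obtain ⟨t, ts, hts⟩ := List.exists_cons_of_ne_nil
        (List.splitOnP_ne_nil (fun c => c == ',') rest)
      have hcast : ((n : Int) + 1) = ((n + 1 : Nat) : Int) := by push_cast; ring
      have ihn := ih (n + 1)
      have hsplit : (',' :: rest).splitOn ',' = [] :: rest.splitOn ',' := by
        simp [List.splitOn, List.splitOnP_cons]
      rw [hsplit]
      simp only [List.headI, List.tail_cons, List.nil_append]
      simp only [pvF]
      rw [hcast, ihn]
      simp only [List.splitOn, hts, List.headI, List.tail_cons, pvB_join]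
      by_cases h16 : (n + 1) % 16 = 0
      · have hi : (16 : Int) ∣ (n : Int) + 1 := by omega
        simp [h16, hi]
      · have hi : ¬ (16 : Int) ∣ (n : Int) + 1 := by omega
        simp [h16, hi]
    · obtain ⟨t, ts, hts⟩ := List.exists_cons_of_ne_nil
        (List.splitOnP_ne_nil (fun c => c == ',') rest)
      rw [List.splitOn, List.splitOnP_cons] at *
      simp [pvF, h, hts, ih n, List.headI, List.modifyHead]

-- ===== VERDICT (by name: the statement is the Claim_ definition above) =====
theorem add_newline_after_16th_comma_spec : Claim_equal_add_newline_after_16th_comma := by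
  intro s _
  unfold Spec_add_newline_after_16th_comma add_newline_after_16th_comma
    add_newline_after_16th_comma_alt
  obtain ⟨t, ts, hts⟩ := List.exists_cons_of_ne_nil
    (List.splitOnP_ne_nil (fun c => c == ',') s.toList)
  rw [pvA_go_eq]
  have h0 : (0 : Int) = ((0 : Nat) : Int) := rfl
  rw [h0, pvF_splitOn]
  rw [List.splitOn] at *
  simp [hts, List.headI]
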